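-- pv_equiv track=rewrite | github.com/MForofontov/Python-functions | iterable_functions/sort_subdict_by_tuple.py | sort_subdict_by_tuple
-- ===== SOURCE A (Python) =====
-- from typing import Any, Dict, Tuple
-- from collections import OrderedDict
--
-- def sort_subdict_by_tuple(dict_: Dict[str, Dict[str, Any]], order: Tuple[str, ...]) -> Dict[str, OrderedDict]:
--     """
--     Sorts the sub-dictionaries of a given dictionary based on a specified order tuple.
--
--     Parameters
--     ----------
--     dict_ : Dict[str, Dict[str, Any]]
--         The input dictionary containing sub-dictionaries as values.
--     order : Tuple[str, ...]
--         A tuple specifying the desired order of keys in the sorted sub-dictionaries.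
--
--     Returns
--     -------
--     Dict[str, OrderedDict]
--         A new dictionary with each sub-dictionary sorted according to the specified order.
--
--     Raises
--     ------
--     TypeError
--         If dict_ is not a dictionary of dictionaries or order is not a tuple of strings.
--     """
--     if not isinstance(dict_, dict) or not all(isinstance(subdict, dict) for subdict in dict_.values()):
--         raise TypeError("dict_ must be a dictionary with sub-dictionaries as values")
--     if not isinstance(order, tuple) or not all(isinstance(item, str) for item in order):
--         raise TypeError("order must be a tuple of strings")
--
--     sorted_data: Dict[str, OrderedDict] = {}
--     for key, subdict in dict_.items():
--         sorted_subdict = OrderedDict(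
--             sorted(subdict.items(), key=lambda item: order.index(item[0]) if item[0] in order else len(order))
--         )
--         sorted_data[key] = sorted_subdict
--     return sorted_data
-- ===== SOURCE B (Python) =====
-- from collections import OrderedDict
--
-- def sort_subdict_by_tuple(dict_, order):
--     """Rebuild each sub-dictionary instead of sorting it: insert the keys listed in
--     `order` first (in order), then the remaining keys in their original order."""
--     if not isinstance(dict_, dict) or not all(isinstance(subdict, dict) for subdict in dict_.values()):
--         raise TypeError("dict_ must be a dictionary with sub-dictionaries as values")
--     if not isinstance(order, tuple) or not all(isinstance(item, str) for item in order):
--         raise TypeError("order must be a tuple of strings")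
--
--     result = {}
--     for key, subdict in dict_.items():
--         rebuilt = OrderedDict()
--         for k in order:
--             if k in subdict:
--                 rebuilt[k] = subdict[k]
--         for k, v in subdict.items():
--             if k not in rebuilt:
--                 rebuilt[k] = v
--         result[key] = rebuilt
--     return result
-- ===== Notes on version B (the rewrite author's own statement) =====
-- stated objective: alternative
-- what changed: Replaces the comparison sort (whose key function does a linear order.index scan per item) with a two-pass OrderedDict rebuild: insert the order-listed keys present in the subdict first, then append the remaining items in their original order.
import Mathlib
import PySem

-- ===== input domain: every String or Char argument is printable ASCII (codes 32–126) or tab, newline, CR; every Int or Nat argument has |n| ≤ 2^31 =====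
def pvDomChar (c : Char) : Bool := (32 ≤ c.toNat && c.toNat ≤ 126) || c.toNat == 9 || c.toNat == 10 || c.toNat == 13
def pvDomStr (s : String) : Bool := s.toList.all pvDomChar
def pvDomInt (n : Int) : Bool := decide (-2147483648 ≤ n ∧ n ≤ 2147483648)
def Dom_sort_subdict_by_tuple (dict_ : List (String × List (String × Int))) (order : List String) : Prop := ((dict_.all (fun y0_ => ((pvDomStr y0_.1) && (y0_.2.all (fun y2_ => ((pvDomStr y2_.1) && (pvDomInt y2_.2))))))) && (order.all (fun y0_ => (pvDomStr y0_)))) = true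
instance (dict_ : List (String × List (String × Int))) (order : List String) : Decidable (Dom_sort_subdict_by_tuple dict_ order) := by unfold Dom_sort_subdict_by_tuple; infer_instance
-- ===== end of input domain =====

-- B rebuilds each sub-dictionary in two passes over `order` and the subdict instead of sorting its
-- items with an order.index key; equal return values on association lists whose subdict keys are distinct.


-- ===== PORT A =====
-- the sort key: order.index(item[0]) if item[0] in order else len(order)
def pyAKey (order : List String) (item : String × Int) : Nat :=
  match PySem.List.index? order item.1 with
  | some i => i
  | none => order.length

def sort_subdict_by_tuple (dict_ : List (String × List (String × Int))) (order : List String) : List (String × List (String × Int)) :=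
  (dict_.foldl
    (fun sorted_data kv =>
      PySem.Dict.insert sorted_data kv.1
        ((PySem.Dict.ofList (PySem.List.sorted kv.2 (pyAKey order))).items))
    PySem.Dict.empty).items

-- ===== PORT B =====
-- rebuild one subdict: keys from `order` first (those present), then the remaining items in original order
def rebuildSub (order : List String) (subdict : List (String × Int)) : List (String × Int) :=
  let pass1 := order.foldl
    (fun rebuilt k =>
      match PySem.Dict.get? ⟨subdict⟩ k with
      | some v => PySem.Dict.insert rebuilt k v
      | none => rebuilt)
    PySem.Dict.empty
  (subdict.foldl
    (fun rebuilt kv =>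
      if rebuilt.contains kv.1 then rebuilt
      else PySem.Dict.insert rebuilt kv.1 kv.2)
    pass1).items

def sort_subdict_by_tuple_alt (dict_ : List (String × List (String × Int))) (order : List String) : List (String × List (String × Int)) :=
  (dict_.foldl
    (fun result kv => PySem.Dict.insert result kv.1 (rebuildSub order kv.2))
    PySem.Dict.empty).items

-- ===== PRECONDITION & SPEC =====
-- Pre_ excludes association lists in which some sub-dictionary repeats a key: such a list does not
-- represent a Python dict (a Python dict's keys are distinct), so A's behaviour there is not defined by A.
def Pre_sort_subdict_by_tuple (dict_ : List (String × List (String × Int))) (order : List String) : Prop :=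
  ∀ kv ∈ dict_, (kv.2.map Prod.fst).Nodup
instance (dict_ : List (String × List (String × Int))) (order : List String) : Decidable (Pre_sort_subdict_by_tuple dict_ order) := by unfold Pre_sort_subdict_by_tuple; infer_instance
def pvWitness_sort_subdict_by_tuple : (List (String × List (String × Int))) × List String :=
  ([("a", [("x", 1), ("y", 2)]), ("b", [("z", 3)])], ["y", "w"])
def Spec_sort_subdict_by_tuple (dict_ : List (String × List (String × Int))) (order : List String) (out : List (String × List (String × Int))) : Prop := out = sort_subdict_by_tuple_alt dict_ order
instance (dict_ : List (String × List (String × Int))) (order : List String) (out : List (String × List (String × Int))) : Decidable (Spec_sort_subdict_by_tuple dict_ order out) := by unfold Spec_sort_subdict_by_tuple; infer_instance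

-- ===== CLAIM (what is proved, stated in full; the proofs are below) =====
def Claim_equal_sort_subdict_by_tuple : Prop := ∀ (dict_ : List (String × List (String × Int))) (order : List String), Dom_sort_subdict_by_tuple dict_ order → Pre_sort_subdict_by_tuple dict_ order → Spec_sort_subdict_by_tuple dict_ order (sort_subdict_by_tuple dict_ order)

-- ===== LEMMAS AND PROOFS =====

theorem sorted_snoc {α κ : Type} [LT κ] [DecidableLT κ] (xs : List α) (x : α) (key : α → κ) :
    PySem.List.sorted (xs ++ [x]) key = PySem.List.insertBy (fun a b => decide (key a < key b)) x (PySem.List.sorted xs key) := by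
  rw [PySem.List.sorted_eq_foldl_insertBy, PySem.List.sorted_eq_foldl_insertBy, List.foldl_append]
  rfl

theorem insertBy_append_right {α : Type} (before : α → α → Bool) (x : α) (A B : List α)
    (h : ∀ b ∈ B, before x b = true) :
    PySem.List.insertBy before x (A ++ B) = PySem.List.insertBy before x A ++ B := by
  induction A with
  | nil =>
    simp only [List.nil_append]
    cases B with
    | nil => rfl
    | cons b bs => simp [PySem.List.insertBy, h b (by simp)]
  | cons a A ih =>
    simp only [List.cons_append, PySem.List.insertBy]
    by_cases hb : before x a
    · simp [hb]
    · simp [hb, ih]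

theorem sorted_split {α : Type} (key : α → Nat) (L : Nat) (xs : List α) (h : ∀ x ∈ xs, key x ≤ L) :
    PySem.List.sorted xs key =
      PySem.List.sorted (xs.filter (fun x => decide (key x < L))) key
        ++ xs.filter (fun x => !decide (key x < L)) := by
  induction xs using List.reverseRecOn with
  | nil => rfl
  | append_singleton xs x ih =>
    have hxs : ∀ y ∈ xs, key y ≤ L := fun y hy => h y (by simp [hy])
    rw [sorted_snoc, ih hxs, List.filter_append, List.filter_append]
    by_cases hx : key x < L
    · -- x goes into the sorted front part
      rw [insertBy_append_right _ x _ _ (by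
        intro b hb
        simp only [List.mem_filter, Bool.not_eq_eq_eq_not, Bool.not_true, decide_eq_false_iff_not, not_lt] at hb
        have : key b = L := le_antisymm (hxs b hb.1) hb.2
        simp [this, hx])]
      rw [← sorted_snoc]
      simp [hx]
    · -- x has the maximal key: it is appended at the very end
      have hkx : key x = L := le_antisymm (h x (by simp)) (not_lt.mp hx)
      rw [PySem.List.insertBy_of_forall_not_before _ x _ (by
        intro y hy
        have hy' : y ∈ xs := by
          rcases List.mem_append.mp hy with h1 | h1
          · exact (List.mem_filter.mp ((PySem.List.mem_sorted _ _ _ y).mp h1)).1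
          · exact (List.mem_filter.mp h1).1
        simp only [decide_eq_false_iff_not, not_lt, hkx]
        exact hxs y hy')]
      simp [hx, List.append_assoc]

def keyStrFn (os : List String) (k : String) : Nat :=
  match PySem.List.index? os k with | some i => i | none => os.length

theorem keyStr_le (os : List String) (a : String) : keyStrFn os a ≤ os.length := by
  unfold keyStrFn
  cases h : PySem.List.index? os a with
  | none => exact le_refl _
  | some i =>
    obtain ⟨hk, -, -⟩ := PySem.List.getElem_of_index?_eq_some h
    exact le_of_lt hk

theorem keyStr_lt_iff (os : List String) (a : String) : keyStrFn os a < os.length ↔ a ∈ os := by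
  unfold keyStrFn
  cases h : PySem.List.index? os a with
  | none =>
    simp only [lt_irrefl, false_iff]
    exact (PySem.List.index?_eq_none_iff os a).mp h
  | some i =>
    obtain ⟨hk, hget, -⟩ := PySem.List.getElem_of_index?_eq_some h
    simp only [hk, true_iff]
    exact hget ▸ List.getElem_mem hk

theorem keyStr_snoc_of_mem (os : List String) (k a : String) (ha : a ∈ os) :
    keyStrFn (os ++ [k]) a = keyStrFn os a := by
  obtain ⟨i, hi⟩ := Option.isSome_iff_exists.mp ((PySem.List.index?_isSome_iff os a).mpr ha)
  unfold keyStrFn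
  rw [PySem.List.index?_append_of_mem _ ha, hi]

theorem pairwise_keyStr (os : List String) :
    (PySem.Set.ofList os).Pairwise (fun a b => keyStrFn os a < keyStrFn os b) := by
  induction os using List.reverseRecOn with
  | nil => simp [PySem.Set.ofList, PySem.Set.empty]
  | append_singleton os k ih =>
    rw [PySem.Set.ofList_append_singleton]
    by_cases hk : k ∈ os
    · rw [PySem.Set.add_of_mem ((PySem.Set.mem_ofList os k).mpr hk)]
      refine ih.imp_of_mem ?_
      intro a b ha hb hlt
      rw [keyStr_snoc_of_mem os k a ((PySem.Set.mem_ofList os a).mp ha),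
          keyStr_snoc_of_mem os k b ((PySem.Set.mem_ofList os b).mp hb)]
      exact hlt
    · rw [PySem.Set.add_of_not_mem (fun hc => hk ((PySem.Set.mem_ofList os k).mp hc))]
      rw [List.pairwise_append]
      refine ⟨ih.imp_of_mem ?_, List.pairwise_singleton _ _, ?_⟩
      · intro a b ha hb hlt
        rw [keyStr_snoc_of_mem os k a ((PySem.Set.mem_ofList os a).mp ha),
            keyStr_snoc_of_mem os k b ((PySem.Set.mem_ofList os b).mp hb)]
        exact hlt
      · intro a ha b hb
        rw [List.mem_singleton] at hb
        subst hb
        have ha' := (PySem.Set.mem_ofList os a).mp ha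
        rw [keyStr_snoc_of_mem os b a ha']
        have hbk : keyStrFn (os ++ [b]) b = os.length := by
          unfold keyStrFn
          rw [PySem.List.index?_append_singleton_self os b hk]
        rw [hbk]
        exact (keyStr_lt_iff os a).mpr ha'

theorem eq_of_mem_of_nodup_keys {K V : Type} {l : List (K × V)} (hnd : (l.map Prod.fst).Nodup)
    {p q : K × V} (hp : p ∈ l) (hq : q ∈ l) (h : p.1 = q.1) : p = q := by
  induction l with
  | nil => cases hp
  | cons a tl ih =>
    simp only [List.map_cons, List.nodup_cons] at hnd
    rcases List.mem_cons.mp hp with hp1 | hp1 <;> rcases List.mem_cons.mp hq with hq1 | hq1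
    · rw [hp1, hq1]
    · subst hp1
      exact absurd (List.mem_map_of_mem (f := Prod.fst) hq1) (h ▸ hnd.1)
    · subst hq1
      exact absurd (List.mem_map_of_mem (f := Prod.fst) hp1) (h ▸ hnd.1)
    · exact ih hnd.2 hp1 hq1

theorem contains_mk_iff {V : Type} (l : List (String × V)) (k : String) :
    (PySem.Dict.mk l).contains k = true ↔ k ∈ l.map Prod.fst := by
  rw [PySem.Dict.contains_mk]
  simp [List.any_eq_true, List.mem_map]

theorem insert_mk_of_not_mem {V : Type} (l : List (String × V)) (k : String) (v : V)
    (h : k ∉ l.map Prod.fst) :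
    (PySem.Dict.mk l).insert k v = ⟨l ++ [(k, v)]⟩ := by
  have hc : (PySem.Dict.mk l).contains k = false := by
    rw [← Bool.not_eq_true]
    exact fun hc => h ((contains_mk_iff l k).mp hc)
  simp [PySem.Dict.insert, hc]

theorem insert_mk_self {V : Type} (l : List (String × V)) (k : String) (v : V)
    (hnd : (l.map Prod.fst).Nodup) (hmem : (k, v) ∈ l) :
    (PySem.Dict.mk l).insert k v = ⟨l⟩ := by
  have hc : (PySem.Dict.mk l).contains k = true :=
    (contains_mk_iff l k).mpr (List.mem_map_of_mem (f := Prod.fst) hmem)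
  simp only [PySem.Dict.insert, hc, if_true, PySem.Dict.mk.injEq]
  rw [show l = List.map id l from (List.map_id l).symm]
  rw [List.map_map]
  refine List.map_congr_left ?_
  intro p hp
  simp only [Function.comp, id]
  by_cases hpk : p.1 = k
  · have : p = (k, v) := eq_of_mem_of_nodup_keys hnd hp hmem hpk
    simp [this]
  · simp [hpk]

theorem items_ofList_of_nodup {V : Type} (l : List (String × V)) (h : (l.map Prod.fst).Nodup) :
    (PySem.Dict.ofList l).items = l := by
  have := PySem.Dict.items_foldl_insert_fresh l Prod.fst Prod.snd PySem.Dict.empty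
    (fun a _ => rfl) h
  simpa [PySem.Dict.ofList, PySem.Dict.update, PySem.Dict.empty] using this

def Gmap (sub : List (String × Int)) (ks : List String) : List (String × Int) :=
  ks.filterMap (fun k => (PySem.Dict.get? ⟨sub⟩ k).map (fun v => (k, v)))

theorem Gmap_keys (sub : List (String × Int)) (ks : List String) :
    (Gmap sub ks).map Prod.fst = ks.filter (fun k => (PySem.Dict.get? ⟨sub⟩ k).isSome) := by
  induction ks with
  | nil => rfl
  | cons k ks ih =>
    unfold Gmap at *
    cases h : PySem.Dict.get? (⟨sub⟩ : PySem.Dict String Int) k with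
    | none => simp [h, ih]
    | some v => simp [h, ih]

theorem mem_Gmap (sub : List (String × Int)) (ks : List String) (p : String × Int) :
    p ∈ Gmap sub ks ↔ p.1 ∈ ks ∧ PySem.Dict.get? (⟨sub⟩ : PySem.Dict String Int) p.1 = some p.2 := by
  unfold Gmap
  rw [List.mem_filterMap]
  constructor
  · rintro ⟨a, ha, hfa⟩
    obtain ⟨v, hv, hpv⟩ := Option.map_eq_some_iff.mp hfa
    cases p
    cases hpv
    exact ⟨ha, hv⟩
  · rintro ⟨h1, h2⟩
    exact ⟨p.1, h1, by rw [h2]; rfl⟩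

theorem Gmap_keys_nodup (sub : List (String × Int)) (os : List String) :
    ((Gmap sub (PySem.Set.ofList os)).map Prod.fst).Nodup := by
  rw [Gmap_keys]
  exact (PySem.Set.nodup_ofList os).filter _

theorem pass1_items (order : List String) (sub : List (String × Int)) :
    (order.foldl
      (fun rebuilt k =>
        match PySem.Dict.get? (⟨sub⟩ : PySem.Dict String Int) k with
        | some v => PySem.Dict.insert rebuilt k v
        | none => rebuilt)
      PySem.Dict.empty).items = Gmap sub (PySem.Set.ofList order) := by
  induction order using List.reverseRecOn with
  | nil => rfl
  | append_singleton os k ih =>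
    rw [List.foldl_append, List.foldl_cons, List.foldl_nil, PySem.Set.ofList_append_singleton]
    cases h : PySem.Dict.get? (⟨sub⟩ : PySem.Dict String Int) k with
    | none =>
      simp only [ih]
      by_cases hk : k ∈ os
      · rw [PySem.Set.add_of_mem ((PySem.Set.mem_ofList os k).mpr hk)]
      · rw [PySem.Set.add_of_not_mem (fun hc => hk ((PySem.Set.mem_ofList os k).mp hc))]
        unfold Gmap
        rw [List.filterMap_append]
        simp [h]
    | some v =>
      by_cases hk : k ∈ os
      · rw [PySem.Set.add_of_mem ((PySem.Set.mem_ofList os k).mpr hk)]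
        have hd : (List.foldl
            (fun rebuilt k =>
              match PySem.Dict.get? (⟨sub⟩ : PySem.Dict String Int) k with
              | some v => PySem.Dict.insert rebuilt k v
              | none => rebuilt)
            PySem.Dict.empty os) = ⟨Gmap sub (PySem.Set.ofList os)⟩ := by
          cases hfd : (List.foldl
            (fun rebuilt k =>
              match PySem.Dict.get? (⟨sub⟩ : PySem.Dict String Int) k with
              | some v => PySem.Dict.insert rebuilt k v
              | none => rebuilt)
            PySem.Dict.empty os) with
          | mk l => rw [← ih, hfd]
        rw [hd]
        rw [show (match some v with
              | some v => (⟨Gmap sub (PySem.Set.ofList os)⟩ : PySem.Dict String Int).insert k v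
              | none => (⟨Gmap sub (PySem.Set.ofList os)⟩ : PySem.Dict String Int))
            = (⟨Gmap sub (PySem.Set.ofList os)⟩ : PySem.Dict String Int).insert k v from rfl]
        have hmem : (k, v) ∈ Gmap sub (PySem.Set.ofList os) :=
          (mem_Gmap sub _ (k, v)).mpr ⟨(PySem.Set.mem_ofList os k).mpr hk, h⟩
        rw [insert_mk_self _ _ _ (Gmap_keys_nodup sub os) hmem]
      · rw [PySem.Set.add_of_not_mem (fun hc => hk ((PySem.Set.mem_ofList os k).mp hc))]
        have hd : (List.foldl
            (fun rebuilt k =>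
              match PySem.Dict.get? (⟨sub⟩ : PySem.Dict String Int) k with
              | some v => PySem.Dict.insert rebuilt k v
              | none => rebuilt)
            PySem.Dict.empty os) = ⟨Gmap sub (PySem.Set.ofList os)⟩ := by
          cases hfd : (List.foldl
            (fun rebuilt k =>
              match PySem.Dict.get? (⟨sub⟩ : PySem.Dict String Int) k with
              | some v => PySem.Dict.insert rebuilt k v
              | none => rebuilt)
            PySem.Dict.empty os) with
          | mk l => rw [← ih, hfd]
        rw [hd]
        rw [show (match some v with
              | some v => (⟨Gmap sub (PySem.Set.ofList os)⟩ : PySem.Dict String Int).insert k v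
              | none => (⟨Gmap sub (PySem.Set.ofList os)⟩ : PySem.Dict String Int))
            = (⟨Gmap sub (PySem.Set.ofList os)⟩ : PySem.Dict String Int).insert k v from rfl]
        have hnk : k ∉ (Gmap sub (PySem.Set.ofList os)).map Prod.fst := by
          rw [Gmap_keys]
          intro hc
          exact hk ((PySem.Set.mem_ofList os k).mp (List.mem_of_mem_filter hc))
        rw [insert_mk_of_not_mem _ _ _ hnk]
        unfold Gmap
        rw [List.filterMap_append]
        simp [h]

theorem pass2_items (xs : List (String × Int)) :
    ∀ (acc : List (String × Int)), (xs.map Prod.fst).Nodup →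
    (xs.foldl
      (fun rebuilt kv => if rebuilt.contains kv.1 then rebuilt else PySem.Dict.insert rebuilt kv.1 kv.2)
      (⟨acc⟩ : PySem.Dict String Int)).items
    = acc ++ xs.filter (fun kv => !(PySem.Dict.mk acc).contains kv.1) := by
  induction xs with
  | nil => intro acc _; simp
  | cons kv xs ih =>
    intro acc hnd
    simp only [List.map_cons, List.nodup_cons] at hnd
    rw [List.foldl_cons]
    by_cases hc : (PySem.Dict.mk acc).contains kv.1 = true
    · rw [if_pos hc, ih acc hnd.2, List.filter_cons]
      simp [hc]
    · have hc' : (PySem.Dict.mk acc).contains kv.1 = false := Bool.eq_false_iff.mpr hc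
      rw [if_neg hc]
      have hnm : kv.1 ∉ acc.map Prod.fst := fun hm => hc ((contains_mk_iff acc kv.1).mpr hm)
      rw [insert_mk_of_not_mem acc kv.1 kv.2 hnm]
      rw [ih (acc ++ [(kv.1, kv.2)]) hnd.2]
      have hfc : xs.filter (fun kv' => !(PySem.Dict.mk (acc ++ [(kv.1, kv.2)])).contains kv'.1)
          = xs.filter (fun kv' => !(PySem.Dict.mk acc).contains kv'.1) := by
        refine List.filter_congr ?_
        intro kv' hkv'
        have hne : kv'.1 ≠ kv.1 := by
          intro he
          exact hnd.1 (he ▸ List.mem_map_of_mem (f := Prod.fst) hkv')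
        have : (PySem.Dict.mk (acc ++ [(kv.1, kv.2)])).contains kv'.1
            = (PySem.Dict.mk acc).contains kv'.1 := by
          rw [Bool.eq_iff_iff, contains_mk_iff, contains_mk_iff, List.map_append]
          simp [hne]
        rw [this]
      rw [hfc, List.filter_cons]
      simp [hc', Prod.mk.eta, List.append_assoc]

theorem pyAKey_eq_keyStr (order : List String) (p : String × Int) :
    pyAKey order p = keyStrFn order p.1 := rfl

theorem main_subdict (order : List String) (sub : List (String × Int))
    (hnd : (sub.map Prod.fst).Nodup) :
    (PySem.Dict.ofList (PySem.List.sorted sub (pyAKey order))).items = rebuildSub order sub := by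
  have hsubnd : sub.Nodup := List.Nodup.of_map _ hnd
  have hkeys : ∀ p ∈ sub, PySem.Dict.get? (⟨sub⟩ : PySem.Dict String Int) p.1 = some p.2 := by
    intro p hp
    exact PySem.Dict.get?_of_mem_items _ (by cases p; exact hp) (by rw [PySem.Dict.keys_mk]; exact hnd)
  -- LHS = the plain stable sort
  have hsortnd : ((PySem.List.sorted sub (pyAKey order)).map Prod.fst).Nodup := by
    have hperm := (PySem.List.sorted_perm sub (pyAKey order) false).map Prod.fst
    exact hperm.nodup_iff.mpr hnd
  rw [items_ofList_of_nodup _ hsortnd]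
  -- split the sort at the maximal key order.length
  rw [sorted_split (pyAKey order) order.length sub (fun x _ => keyStr_le order x.1)]
  -- the front part is Gmap
  have hfront : PySem.List.sorted (sub.filter (fun x => decide (pyAKey order x < order.length)))
      (pyAKey order) = Gmap sub (PySem.Set.ofList order) := by
    apply PySem.List.sorted_eq_of_perm_of_pairwise_lt
    · rw [List.perm_ext_iff_of_nodup
        (List.Nodup.of_map Prod.fst (Gmap_keys_nodup sub order)) (hsubnd.filter _)]
      intro p
      rw [mem_Gmap, List.mem_filter]
      constructor
      · rintro ⟨h1, h2⟩
        have hp : p ∈ sub := by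
          have := PySem.Dict.mem_items_of_get?_eq_some _ h2
          cases p; exact this
        refine ⟨hp, ?_⟩
        simp only [decide_eq_true_eq, pyAKey_eq_keyStr]
        exact (keyStr_lt_iff order p.1).mpr ((PySem.Set.mem_ofList order p.1).mp h1)
      · rintro ⟨h1, h2⟩
        simp only [decide_eq_true_eq, pyAKey_eq_keyStr] at h2
        exact ⟨(PySem.Set.mem_ofList order p.1).mpr ((keyStr_lt_iff order p.1).mp h2), hkeys p h1⟩
    · unfold Gmap
      rw [List.pairwise_filterMap]
      refine (pairwise_keyStr order).imp_of_mem ?_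
      intro a b _ _ hlt p hp q hq
      obtain ⟨va, -, hpa⟩ := Option.map_eq_some_iff.mp hp
      obtain ⟨vb, -, hqb⟩ := Option.map_eq_some_iff.mp hq
      rw [pyAKey_eq_keyStr, pyAKey_eq_keyStr, ← hpa, ← hqb]
      exact hlt
  rw [hfront]
  -- now compute the RHS
  unfold rebuildSub
  have hp1 : (List.foldl
      (fun rebuilt k =>
        match PySem.Dict.get? (⟨sub⟩ : PySem.Dict String Int) k with
        | some v => PySem.Dict.insert rebuilt k v
        | none => rebuilt)
      PySem.Dict.empty order) = ⟨Gmap sub (PySem.Set.ofList order)⟩ := by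
    cases hfd : (List.foldl
      (fun rebuilt k =>
        match PySem.Dict.get? (⟨sub⟩ : PySem.Dict String Int) k with
        | some v => PySem.Dict.insert rebuilt k v
        | none => rebuilt)
      PySem.Dict.empty order) with
    | mk l => rw [← pass1_items order sub, hfd]
  rw [hp1, pass2_items sub _ hnd]
  congr 1
  refine List.filter_congr ?_
  intro kv hkv
  rw [Bool.eq_iff_iff]
  simp only [Bool.not_eq_eq_eq_not, Bool.not_true, decide_eq_false_iff_not, not_lt]
  constructor
  · intro hge
    rw [Bool.eq_false_iff]
    intro hct
    have hm := (contains_mk_iff _ kv.1).mp hct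
    rw [Gmap_keys] at hm
    have h1 := (PySem.Set.mem_ofList order kv.1).mp (List.mem_of_mem_filter hm)
    have h2 := (keyStr_lt_iff order kv.1).mpr h1
    rw [pyAKey_eq_keyStr] at hge
    omega
  · intro hcf
    have hnm : kv.1 ∉ (Gmap sub (PySem.Set.ofList order)).map Prod.fst :=
      fun hm => by rw [(contains_mk_iff _ kv.1).mpr hm] at hcf; cases hcf
    rw [Gmap_keys] at hnm
    simp only [List.mem_filter, PySem.Set.mem_ofList, not_and] at hnm
    rw [pyAKey_eq_keyStr]
    by_contra hlt
    exact hnm ((keyStr_lt_iff order kv.1).mp (lt_of_not_ge hlt)) (by rw [hkeys kv hkv]; rfl)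

-- ===== VERDICT (by name: the statement is the Claim_ definition above) =====
theorem sort_subdict_by_tuple_spec : Claim_equal_sort_subdict_by_tuple := by
  intro dict_ order _hdom hpre
  unfold Spec_sort_subdict_by_tuple sort_subdict_by_tuple sort_subdict_by_tuple_alt
  have : List.foldl
      (fun sorted_data kv =>
        PySem.Dict.insert sorted_data kv.1
          ((PySem.Dict.ofList (PySem.List.sorted kv.2 (pyAKey order))).items))
      PySem.Dict.empty dict_
      = List.foldl (fun result kv => PySem.Dict.insert result kv.1 (rebuildSub order kv.2))
        PySem.Dict.empty dict_ := by
    apply PySem.List.foldl_congr_mem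
    intro acc kv hkv
    rw [main_subdict order kv.2 (hpre kv hkv)]
  rw [this]
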